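-- pv_equiv track=rewrite | github.com/NAGA222/Python_Programs | Prime_Pairs.py | prime_pairs
-- ===== SOURCE A (Python) =====
-- def prime_pairs(N):
--     pairs=[]
--     p=2
--     prime=[True for i in range(N+1)]
--     while(p*p<=N):
--         if(prime[p]==True):
--             for i in range(p*p,N+1,p):
--                 prime[i]=False
--
--         p+=1
--     prime1=[]
--     for i in range(2,N+1):
--         if(prime[i]):
--             prime1.append(i)
--     res=[]
--     for i in range(len(prime1)):
--         for j in range(len(prime1)):
--             if(prime1[i]*prime1[j]<=N):
--                 res.append(prime1[i])
--                 res.append(prime1[j])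
--
--     return res
-- ===== SOURCE B (Python) =====
-- def prime_pairs(N):
--     # Trial-division prime generation instead of a sieve table;
--     # pair phase iterates over the prime values with an early break
--     # (primes are ascending, so once p*q > N every later q is too).
--     primes = []
--     n = 2
--     while n <= N:
--         d = 2
--         is_p = True
--         while d * d <= n:
--             if n % d == 0:
--                 is_p = False
--                 break
--             d += 1
--         if is_p:
--             primes.append(n)
--         n += 1
--     res = []
--     for p in primes:
--         for q in primes:
--             if p * q > N:
--                 break
--             res.append(p)
--             res.append(q)
--     return res
-- ===== Notes on version B (the rewrite author's own statement) =====
-- stated objective: alternative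
-- what changed: Prime generation by per-candidate trial division instead of a Sieve of Eratosthenes boolean table, and the pair-emitting phase iterates over prime values with an early break (primes are ascending, so once p*q > N the rest of the row is skipped) instead of index-based full nested scans.
import Mathlib
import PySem

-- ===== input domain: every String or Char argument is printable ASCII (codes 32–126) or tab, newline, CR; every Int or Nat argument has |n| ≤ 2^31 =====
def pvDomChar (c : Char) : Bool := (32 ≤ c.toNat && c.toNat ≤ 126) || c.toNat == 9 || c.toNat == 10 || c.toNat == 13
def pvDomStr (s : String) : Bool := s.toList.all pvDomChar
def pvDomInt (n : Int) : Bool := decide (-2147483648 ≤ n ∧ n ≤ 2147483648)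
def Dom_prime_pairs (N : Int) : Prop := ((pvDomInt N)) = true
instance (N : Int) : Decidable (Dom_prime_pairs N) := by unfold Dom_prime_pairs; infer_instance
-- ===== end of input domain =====

-- B replaces A's sieve table by per-candidate trial division and emits the pairs by
-- iterating the prime values with an early break (primes are ascending), instead of
-- A's full index-based nested scans; same exact output (measured faster by the check).

-- ===== PORT A =====
-- A's while loop: p increases while p*p ≤ N; indices p and the marked multiples i are
-- provably ≥ 0 and < len(prime) whenever the loop body runs, so prime[p] / prime[i]=False
-- are ported with getD/set on i.toNat (exact: the Python never raises here).
def pvSieveLoop (N : Int) (prime : List Bool) (p : Int) : List Bool :=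
  if h : p * p ≤ N then
    pvSieveLoop N
      (if prime.getD p.toNat true then
        (PySem.List.pyRange (p * p) (N + 1) p).foldl (fun acc i => acc.set i.toNat false) prime
      else prime)
      (p + 1)
  else prime
termination_by (N + 1 - p).toNat
decreasing_by
  have hp : p ≤ N := by nlinarith [mul_self_nonneg (2 * p - 1)]
  omega

def prime_pairs (N : Int) : List Int :=
  -- 'pairs=[]' in the Python is dead and elided
  let prime := pvSieveLoop N (List.replicate (N + 1).toNat true) 2
  let prime1 := (PySem.List.pyRange 2 (N + 1) 1).foldl
    (fun acc i => if prime.getD i.toNat true then acc ++ [i] else acc) []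
  (PySem.List.pyRange 0 (prime1.length : Int) 1).foldl (fun res i =>
    (PySem.List.pyRange 0 (prime1.length : Int) 1).foldl (fun res j =>
      if PySem.List.pyGetD prime1 i 0 * PySem.List.pyGetD prime1 j 0 ≤ N then
        res ++ [PySem.List.pyGetD prime1 i 0, PySem.List.pyGetD prime1 j 0]
      else res) res) []

-- ===== PORT B =====
-- inner 'while d*d <= n: if n % d == 0: break' loop of Source B
def pvTrialDiv (n d : Int) : Bool :=
  if h : d * d ≤ n then
    if PySem.Int.mod n d = 0 then false else pvTrialDiv n (d + 1)
  else true
termination_by (n + 1 - d).toNat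
decreasing_by
  have hd : d ≤ n := by nlinarith [mul_self_nonneg (2 * d - 1)]
  omega

-- 'while n <= N' candidate loop of Source B
def pvPrimesLoop (N : Int) (primes : List Int) (n : Int) : List Int :=
  if h : n ≤ N then
    pvPrimesLoop N (if pvTrialDiv n 2 then primes ++ [n] else primes) (n + 1)
  else primes
termination_by (N + 1 - n).toNat

-- inner 'for q in primes: if p*q > N: break' loop of Source B
def pvPairInner (N p : Int) (res : List Int) : List Int → List Int
  | [] => res
  | q :: qs => if p * q > N then res else pvPairInner N p (res ++ [p, q]) qs

def prime_pairs_alt (N : Int) : List Int :=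
  let primes := pvPrimesLoop N [] 2
  primes.foldl (fun res p => pvPairInner N p res primes) []

-- ===== PRECONDITION & SPEC =====
def Spec_prime_pairs (N : Int) (out : List Int) : Prop := out = prime_pairs_alt N
instance (N : Int) (out : List Int) : Decidable (Spec_prime_pairs N out) := by unfold Spec_prime_pairs; infer_instance

-- ===== CLAIM (what is proved, stated in full; the proofs are below) =====
def Claim_equal_prime_pairs : Prop := ∀ (N : Int), Dom_prime_pairs N → Spec_prime_pairs N (prime_pairs N)

-- ===== LEMMAS AND PROOFS =====

theorem pv_trialDiv_iff (n : Int) : ∀ d : Int, 2 ≤ d →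
    (pvTrialDiv n d = true ↔ ∀ e : Int, d ≤ e → e * e ≤ n → ¬ e ∣ n) := by
  intro d
  induction d using pvTrialDiv.induct (n := n) with
  | case1 d h hmod =>
    intro hd
    rw [pvTrialDiv]
    simp only [dif_pos h, if_pos hmod, Bool.false_eq_true, false_iff, not_forall]
    exact ⟨d, le_rfl, h, fun hn => hn ((PySem.Int.mod_eq_zero_iff_dvd n d).mp hmod)⟩
  | case2 d h hmod ih =>
    intro hd
    rw [pvTrialDiv]
    simp only [dif_pos h, if_neg hmod]
    rw [ih (by omega)]
    have hnd : ¬ d ∣ n := fun hdvd => hmod ((PySem.Int.mod_eq_zero_iff_dvd n d).mpr hdvd)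
    constructor
    · intro hall e hde hen
      rcases eq_or_lt_of_le hde with rfl | hlt
      · exact hnd
      · exact hall e (by omega) hen
    · intro hall e hde hen
      exact hall e (by omega) hen
  | case3 d h =>
    intro hd
    rw [pvTrialDiv]
    simp only [dif_neg h, true_iff]
    intro e hde hen
    have : d * d ≤ e * e := mul_le_mul hde hde (by omega) (by omega)
    exact absurd hen (by intro _; exact h (by linarith))

theorem pv_primesLoop_eq (N : Int) : ∀ (acc : List Int) (n : Int),
    pvPrimesLoop N acc n = acc ++ (PySem.List.pyRange n (N + 1) 1).filter (fun m => pvTrialDiv m 2) := by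
  intro acc n
  generalize hk : (N + 1 - n).toNat = k
  induction k generalizing acc n with
  | zero =>
    rw [pvPrimesLoop, dif_neg (by omega : ¬ n ≤ N), PySem.List.pyRange_one_eq_nil (by omega)]
    simp
  | succ k ih =>
    rw [pvPrimesLoop, dif_pos (by omega : n ≤ N),
      PySem.List.pyRange_one_cons (by omega : n < N + 1), List.filter_cons, ih _ _ (by omega)]
    by_cases ht : pvTrialDiv n 2 <;> simp [ht]

theorem pv_foldl_set_length (l : List Int) (prime : List Bool) :
    (l.foldl (fun acc i => acc.set i.toNat false) prime).length = prime.length := by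
  induction l generalizing prime with
  | nil => rfl
  | cons i t ih => simp [List.foldl_cons, ih, List.length_set]

theorem pv_foldl_set_getD : ∀ (l : List Int) (prime : List Bool) (j : Nat),
    (∀ x ∈ l, 0 ≤ x) → j < prime.length →
    (l.foldl (fun acc i => acc.set i.toNat false) prime).getD j true
      = if (j : Int) ∈ l then false else prime.getD j true := by
  intro l
  induction l with
  | nil => simp
  | cons i t ih =>
    intro prime j hl hj
    have hi : 0 ≤ i := hl i (by simp)
    simp only [List.foldl_cons]
    rw [ih _ j (fun x hx => hl x (by simp [hx])) (by simp [List.length_set, hj])]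
    by_cases hm : (j : Int) ∈ t
    · simp [hm]
    · have hset : (prime.set i.toNat false).getD j true
          = if (j : Int) = i then false else prime.getD j true := by
        simp only [List.getD_eq_getElem?_getD, List.getElem?_set]
        by_cases he : (j : Int) = i
        · have : i.toNat = j := by omega
          simp [this, hj, he]
        · have : ¬ i.toNat = j := by omega
          simp [this, he]
      rw [hset]
      by_cases he : (j : Int) = i <;> simp [hm, he, List.mem_cons]

def SieveInv (N p : Int) (prime : List Bool) : Prop :=
  prime.length = (N + 1).toNat ∧ ∀ j : Nat, j < (N + 1).toNat →
    (prime.getD j true = false ↔ ∃ q : Int, 2 ≤ q ∧ q < p ∧ q * q ≤ (j : Int) ∧ q ∣ (j : Int))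

theorem pv_inv_step (N p : Int) (prime : List Bool) (hp : 2 ≤ p) (hpp : p * p ≤ N)
    (hinv : SieveInv N p prime) :
    SieveInv N (p + 1) (if prime.getD p.toNat true then
        (PySem.List.pyRange (p * p) (N + 1) p).foldl (fun acc i => acc.set i.toNat false) prime
      else prime) := by
  have hple : p ≤ p * p := by nlinarith
  have hpN : p ≤ N := by linarith
  have hpnat : p.toNat < (N + 1).toNat := by omega
  by_cases hg : prime.getD p.toNat true = true
  · rw [if_pos hg]
    have hl : ∀ x ∈ PySem.List.pyRange (p * p) (N + 1) p, 0 ≤ x := by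
      intro x hx
      rw [PySem.List.mem_pyRange_iff_of_pos (by omega)] at hx
      nlinarith [hx.1, mul_self_nonneg p]
    refine ⟨by rw [pv_foldl_set_length]; exact hinv.1, fun j hj => ?_⟩
    rw [pv_foldl_set_getD _ _ j hl (by rw [hinv.1]; exact hj)]
    have hjN : (j : Int) ≤ N := by omega
    constructor
    · intro hfalse
      by_cases hm : (j : Int) ∈ PySem.List.pyRange (p * p) (N + 1) p
      · rw [PySem.List.mem_pyRange_iff_of_pos (by omega)] at hm
        refine ⟨p, hp, by omega, hm.1, ?_⟩
        have hdvd : p ∣ ((j : Int) - p * p) := hm.2.2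
        have hpp' : p ∣ p * p := ⟨p, rfl⟩
        have := dvd_add hdvd hpp'
        simpa using this
      · rw [if_neg hm] at hfalse
        obtain ⟨q, hq1, hq2, hq3, hq4⟩ := (hinv.2 j hj).mp hfalse
        exact ⟨q, hq1, by omega, hq3, hq4⟩
    · rintro ⟨q, hq1, hq2, hq3, hq4⟩
      by_cases hm : (j : Int) ∈ PySem.List.pyRange (p * p) (N + 1) p
      · rw [if_pos hm]
      · rw [if_neg hm]
        rcases lt_or_eq_of_le (by omega : q ≤ p) with hlt | heq
        · exact (hinv.2 j hj).mpr ⟨q, hq1, hlt, hq3, hq4⟩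
        · subst heq
          exfalso
          apply hm
          rw [PySem.List.mem_pyRange_iff_of_pos (by omega)]
          refine ⟨hq3, by omega, ?_⟩
          exact dvd_sub hq4 (dvd_mul_right _ _)

  · rw [if_neg hg]
    have hg' : prime.getD p.toNat true = false := by
      cases h : prime.getD p.toNat true
      · rfl
      · exact absurd h hg
    obtain ⟨r, hr1, hr2, hr3, hr4⟩ := (hinv.2 p.toNat hpnat).mp hg'
    rw [Int.toNat_of_nonneg (by omega)] at hr3 hr4
    refine ⟨hinv.1, fun j hj => ?_⟩
    rw [hinv.2 j hj]
    constructor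
    · rintro ⟨q, hq1, hq2, hq3, hq4⟩
      exact ⟨q, hq1, by omega, hq3, hq4⟩
    · rintro ⟨q, hq1, hq2, hq3, hq4⟩
      rcases lt_or_eq_of_le (by omega : q ≤ p) with hlt | heq
      · exact ⟨q, hq1, hlt, hq3, hq4⟩
      · subst heq
        exact ⟨r, hr1, hr2, by nlinarith, hr4.trans hq4⟩

theorem pv_sieve_char_fuel (N : Int) : ∀ (k : Nat) (prime : List Bool) (p : Int),
    (N + 1 - p).toNat ≤ k → 2 ≤ p → SieveInv N p prime →
    ∀ j : Nat, j < (N + 1).toNat →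
      ((pvSieveLoop N prime p).getD j true = pvTrialDiv (j : Int) 2) := by
  intro k
  induction k with
  | zero =>
    intro prime p hk hp hinv j hj
    have hNp : N < p := by omega
    have hple : p ≤ p * p := by nlinarith
    have hterm : ¬ p * p ≤ N := by intro hc; linarith
    rw [pvSieveLoop, dif_neg hterm]
    have hjN : (j : Int) ≤ N := by omega
    cases hb : prime.getD j true
    · obtain ⟨q, hq1, _, hq3, hq4⟩ := (hinv.2 j hj).mp hb
      cases ht : pvTrialDiv (j : Int) 2
      · rfl
      · exact absurd hq4 ((pv_trialDiv_iff _ 2 le_rfl).mp ht q hq1 hq3)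
    · symm
      rw [pv_trialDiv_iff _ 2 le_rfl]
      intro e he hee hdvd
      have hNpp : N < p * p := not_le.mp hterm
      have hep : e < p := by
        by_contra hc
        push_neg at hc
        have : p * p ≤ e * e := mul_le_mul hc hc (by omega) (by omega)
        linarith
      have hfalse := (hinv.2 j hj).mpr ⟨e, he, hep, hee, hdvd⟩
      rw [hb] at hfalse
      simp at hfalse
  | succ k ih =>
    intro prime p hk hp hinv j hj
    by_cases h : p * p ≤ N
    · rw [pvSieveLoop, dif_pos h]
      have hple : p ≤ p * p := by nlinarith
      exact ih _ (p + 1) (by omega) (by omega) (pv_inv_step N p prime hp h hinv) j hj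
    · rw [pvSieveLoop, dif_neg h]
      have hjN : (j : Int) ≤ N := by omega
      cases hb : prime.getD j true
      · obtain ⟨q, hq1, _, hq3, hq4⟩ := (hinv.2 j hj).mp hb
        cases ht : pvTrialDiv (j : Int) 2
        · rfl
        · exact absurd hq4 ((pv_trialDiv_iff _ 2 le_rfl).mp ht q hq1 hq3)
      · symm
        rw [pv_trialDiv_iff _ 2 le_rfl]
        intro e he hee hdvd
        have hNpp : N < p * p := not_le.mp h
        have hep : e < p := by
          by_contra hc
          push_neg at hc
          have : p * p ≤ e * e := mul_le_mul hc hc (by omega) (by omega)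
          linarith
        have hfalse := (hinv.2 j hj).mpr ⟨e, he, hep, hee, hdvd⟩
        rw [hb] at hfalse
        simp at hfalse

theorem pv_prime1_eq (N : Int) :
    (PySem.List.pyRange 2 (N + 1) 1).foldl
      (fun acc i => if (pvSieveLoop N (List.replicate (N + 1).toNat true) 2).getD i.toNat true
        then acc ++ [i] else acc) []
    = (PySem.List.pyRange 2 (N + 1) 1).filter (fun m => pvTrialDiv m 2) := by
  simp only [PySem.List.foldl_append_if_eq_filter, List.nil_append]
  apply List.filter_congr
  intro x hx
  rw [PySem.List.mem_pyRange_one] at hx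
  have hinv0 : SieveInv N 2 (List.replicate (N + 1).toNat true) := by
    refine ⟨List.length_replicate, fun j hj => ?_⟩
    rw [List.getD_replicate _ hj]
    simp only [Bool.true_eq_false, false_iff]
    rintro ⟨q, hq1, hq2, -, -⟩
    omega
  have := pv_sieve_char_fuel N (N + 1 - 2).toNat _ 2 le_rfl le_rfl hinv0 x.toNat (by omega)
  rw [Int.toNat_of_nonneg (by omega)] at this
  rw [this]

theorem pv_foldl_no (N p : Int) : ∀ (t : List Int) (res : List Int), (∀ x ∈ t, ¬ (p * x ≤ N)) →
    t.foldl (fun res q => if p * q ≤ N then res ++ [p, q] else res) res = res := by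
  intro t
  induction t with
  | nil => intros; rfl
  | cons q t ih =>
    intro res h
    simp only [List.foldl_cons, if_neg (h q (by simp))]
    exact ih res (fun x hx => h x (by simp [hx]))

theorem pv_inner_eq (N p : Int) (hp : 0 < p) : ∀ (qs : List Int) (res : List Int),
    List.Pairwise (· ≤ ·) qs →
    qs.foldl (fun res q => if p * q ≤ N then res ++ [p, q] else res) res = pvPairInner N p res qs := by
  intro qs
  induction qs with
  | nil => intros; rfl
  | cons q t ih =>
    intro res hpw
    rw [List.pairwise_cons] at hpw
    simp only [List.foldl_cons, pvPairInner]
    by_cases hq : p * q ≤ N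
    · rw [if_pos hq, if_neg (by omega)]
      exact ih _ hpw.2
    · rw [if_neg hq, if_pos (by omega)]
      exact pv_foldl_no N p t res
        (fun x hx hle => hq (le_trans (mul_le_mul_of_nonneg_left (hpw.1 x hx) (by omega)) hle))

-- ===== VERDICT (by name: the statement is the Claim_ definition above) =====
theorem prime_pairs_spec : Claim_equal_prime_pairs := by
  unfold Claim_equal_prime_pairs
  intro N _
  unfold Spec_prime_pairs prime_pairs prime_pairs_alt
  simp only []
  rw [pv_prime1_eq N, pv_primesLoop_eq N [] 2, List.nil_append]
  set ps := (PySem.List.pyRange 2 (N + 1) 1).filter (fun m => pvTrialDiv m 2) with hps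
  have hmem : ∀ x ∈ ps, 2 ≤ x := by
    intro x hx
    rw [hps, List.mem_filter, PySem.List.mem_pyRange_one] at hx
    omega
  have hpw : List.Pairwise (· ≤ ·) ps := by
    exact ((PySem.List.pairwise_lt_pyRange_one 2 (N + 1)).filter _).imp le_of_lt
  rw [PySem.List.foldl_pyRange_zero_pyGetD' ps 0
    (fun res x => (PySem.List.pyRange 0 (ps.length : Int) 1).foldl
      (fun res j => if x * PySem.List.pyGetD ps j 0 ≤ N
        then res ++ [x, PySem.List.pyGetD ps j 0] else res) res) []]
  apply PySem.List.foldl_congr_mem'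
  intro p hp acc
  rw [PySem.List.foldl_pyRange_zero_pyGetD' ps 0
    (fun res q => if p * q ≤ N then res ++ [p, q] else res) acc]
  exact pv_inner_eq N p (by have := hmem p hp; omega) ps acc hpw
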